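-- pv_equiv track=rewrite | github.com/ilambrev/freeCodeCamp-Daily-Challenges | Python_Solutions/2025_09_22_digits_vs_letters.py | digits_or_letters
-- ===== SOURCE A (Python) =====
-- def digits_or_letters(s):
--     digits = '0123456789'
--     letters = 'abcdefghijklmnopqrstuvwxyz'
--
--     digits_count = 0
--     letters_count = 0
--
--     for symbol in s:
--         if symbol in digits:
--             digits_count += 1
--
--         if symbol.lower() in letters:
--             letters_count += 1
--
--     if digits_count > letters_count:
--         return 'digits'
--     elif digits_count < letters_count:
--         return 'letters'
--
--     return 'tie'
-- ===== SOURCE B (Python) =====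
-- def digits_or_letters(s):
--     cnt = {}
--     for ch in s:
--         cnt[ch] = cnt.get(ch, 0) + 1
--     digits_count = sum(cnt.get(d, 0) for d in '0123456789')
--     letters_count = sum(v for ch, v in cnt.items()
--                         if ch.lower() in 'abcdefghijklmnopqrstuvwxyz')
--     if digits_count > letters_count:
--         return 'digits'
--     if digits_count < letters_count:
--         return 'letters'
--     return 'tie'
-- ===== Notes on version B (the rewrite author's own statement) =====
-- stated objective: idiomatic
-- what changed: B builds a character-frequency table in one pass and then aggregates counts over the distinct characters (summing table entries for the ten digits and for keys whose lowercase is a letter), instead of A's per-position membership tests with two running counters.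
import Mathlib
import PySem

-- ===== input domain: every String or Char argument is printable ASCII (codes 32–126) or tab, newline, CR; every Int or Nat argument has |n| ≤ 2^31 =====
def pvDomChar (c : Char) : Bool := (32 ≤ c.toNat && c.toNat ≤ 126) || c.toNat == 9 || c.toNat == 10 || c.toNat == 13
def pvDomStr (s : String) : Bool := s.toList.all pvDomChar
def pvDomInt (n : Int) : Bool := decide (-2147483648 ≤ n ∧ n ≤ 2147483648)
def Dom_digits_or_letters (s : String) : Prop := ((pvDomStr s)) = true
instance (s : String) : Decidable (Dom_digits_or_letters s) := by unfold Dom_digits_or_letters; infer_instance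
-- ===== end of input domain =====

-- B replaces A's per-position counting loop by one frequency table built first and
-- then aggregated over the distinct characters (idiomatic; same return value).

-- ===== PORT A =====
-- 'symbol in digits' on a 1-char string is exactly list membership of the char.
def digits_or_letters (s : String) : String :=
  let digits := "0123456789".toList
  let letters := "abcdefghijklmnopqrstuvwxyz".toList
  let p := s.toList.foldl
    (fun (acc : Int × Int) symbol =>
      let acc1 := if digits.contains symbol then (acc.1 + 1, acc.2) else acc
      if letters.contains (PySem.Chars.lowerChar symbol) then (acc1.1, acc1.2 + 1) else acc1)
    ((0 : Int), (0 : Int))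
  if p.1 > p.2 then "digits"
  else if p.1 < p.2 then "letters"
  else "tie"

-- ===== PORT B =====
def digits_or_letters_alt (s : String) : String :=
  let cnt := s.toList.foldl (fun (d : PySem.Dict Char Int) ch => d.insert ch (d.getD ch 0 + 1))
    PySem.Dict.empty
  let digits_count := ("0123456789".toList).foldl (fun a d => a + cnt.getD d 0) (0 : Int)
  let letters_count := cnt.items.foldl
    (fun a kv =>
      if ("abcdefghijklmnopqrstuvwxyz".toList).contains (PySem.Chars.lowerChar kv.1) then a + kv.2 else a)
    (0 : Int)
  if digits_count > letters_count then "digits"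
  else if digits_count < letters_count then "letters"
  else "tie"

-- ===== PRECONDITION & SPEC =====
def Spec_digits_or_letters (s : String) (out : String) : Prop := out = digits_or_letters_alt s
instance (s : String) (out : String) : Decidable (Spec_digits_or_letters s out) := by unfold Spec_digits_or_letters; infer_instance

-- ===== CLAIM (what is proved, stated in full; the proofs are below) =====
def Claim_equal_digits_or_letters : Prop := ∀ (s : String), Dom_digits_or_letters s → Spec_digits_or_letters s (digits_or_letters s)

-- ===== LEMMAS AND PROOFS =====

-- A's loop: both counters are countP of the two membership predicates.
theorem pv_A_fold (xs : List Char) (a b : Int) :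
    xs.foldl
      (fun (acc : Int × Int) symbol =>
        let acc1 := if ("0123456789".toList).contains symbol then (acc.1 + 1, acc.2) else acc
        if ("abcdefghijklmnopqrstuvwxyz".toList).contains (PySem.Chars.lowerChar symbol) then
          (acc1.1, acc1.2 + 1) else acc1)
      (a, b)
    = (a + (xs.countP (fun c => ("0123456789".toList).contains c) : Int),
       b + (xs.countP (fun c => ("abcdefghijklmnopqrstuvwxyz".toList).contains (PySem.Chars.lowerChar c)) : Int)) := by
  induction xs generalizing a b with
  | nil => simp
  | cons c xs ih =>
      simp only [List.foldl_cons, List.countP_cons]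
      by_cases hd : ("0123456789".toList).contains c <;>
        by_cases hl : ("abcdefghijklmnopqrstuvwxyz".toList).contains (PySem.Chars.lowerChar c) <;>
        simp only [hd, hl, if_true, ih] <;>
        push_cast <;> ring_nf

-- Σ over nodup ks, filtered by q, of the indicator of (· = c), for c ∈ ks
theorem pv_sum_indicator (q : Char → Bool) (ks : List Char) (c : Char)
    (hnd : ks.Nodup) (hc : c ∈ ks) :
    (ks.map (fun k => if q k then (if c = k then (1 : Int) else 0) else 0)).sum
      = if q c then 1 else 0 := by
  induction ks with
  | nil => cases hc
  | cons k ks ih =>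
      rcases List.nodup_cons.mp hnd with ⟨hk, hnd'⟩
      by_cases hck : c = k
      · subst hck
        have hz : (ks.map (fun k => if q k then (if c = k then (1 : Int) else 0) else 0)).sum = 0 := by
          rw [List.sum_eq_zero]
          intro x hx
          rcases List.mem_map.mp hx with ⟨k', hk', rfl⟩
          have : ¬ c = k' := fun h => hk (h ▸ hk')
          simp [this]
        simp [hz]
      · have hc' : c ∈ ks := by
          rcases List.mem_cons.mp hc with h | h
          · exact absurd h hck
          · exact h
        simp [hck, ih hnd' hc']

-- Σ over nodup ks of the indicator of (· = c) is the membership indicator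
theorem pv_sum_indicator_mem (ks : List Char) (c : Char) (hnd : ks.Nodup) :
    (ks.map (fun k => if c = k then (1 : Int) else 0)).sum
      = if ks.contains c then 1 else 0 := by
  induction ks with
  | nil => simp
  | cons k ks ih =>
      rcases List.nodup_cons.mp hnd with ⟨hk, hnd'⟩
      by_cases hck : c = k
      · subst hck
        have hz : (ks.map (fun k => if c = k then (1 : Int) else 0)).sum = 0 := by
          rw [List.sum_eq_zero]
          intro x hx
          rcases List.mem_map.mp hx with ⟨k', hk', rfl⟩
          have : ¬ c = k' := fun h => hk (h ▸ hk')
          simp [this]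
        simp [hz]
      · simp [hck, ih hnd']

-- Σ_{k ∈ ks} count xs k = countP (· ∈ ks) xs, for nodup ks
theorem pv_sum_count (ks xs : List Char) (hnd : ks.Nodup) :
    (ks.map (fun k => (xs.count k : Int))).sum
      = (xs.countP (fun c => ks.contains c) : Int) := by
  induction xs with
  | nil => simp
  | cons c xs ih =>
      have hsplit : (ks.map (fun k => ((c :: xs).count k : Int))).sum
          = (ks.map (fun k => (xs.count k : Int) + (if c = k then (1 : Int) else 0))).sum := by
        refine congrArg List.sum (List.map_congr_left fun k _ => ?_)
        by_cases h : c = k <;> simp [h]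
      rw [hsplit, PySem.List.sum_map_add_int, ih, pv_sum_indicator_mem ks c hnd, List.countP_cons]
      by_cases h : ks.contains c <;> simp
--
-- Σ over distinct keys covering xs, filtered by q, of count = countP q
theorem pv_sum_count_filter (q : Char → Bool) (ks xs : List Char)
    (hnd : ks.Nodup) (hcov : ∀ x ∈ xs, x ∈ ks) :
    (ks.map (fun k => if q k then (xs.count k : Int) else 0)).sum
      = (xs.countP q : Int) := by
  induction xs with
  | nil => simp
  | cons c xs ih =>
      have hcov' : ∀ x ∈ xs, x ∈ ks := fun x hx => hcov x (List.mem_cons_of_mem _ hx)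
      have hsplit : (ks.map (fun k => if q k then ((c :: xs).count k : Int) else 0)).sum
          = (ks.map (fun k => (if q k then (xs.count k : Int) else 0)
              + (if q k then (if c = k then (1 : Int) else 0) else 0))).sum := by
        refine congrArg List.sum (List.map_congr_left fun k _ => ?_)
        by_cases hq : q k <;> by_cases h : c = k <;> simp [hq, h]
      rw [hsplit, PySem.List.sum_map_add_int, ih hcov',
        pv_sum_indicator q ks c hnd (hcov c List.mem_cons_self), List.countP_cons]
      by_cases h : q c <;> simp [h]

-- B's letters loop as a filtered sum over the items
theorem pv_foldl_if_add (l : List (Char × Int)) (a : Int) :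
    l.foldl (fun a kv =>
        if ("abcdefghijklmnopqrstuvwxyz".toList).contains (PySem.Chars.lowerChar kv.1) then a + kv.2 else a) a
      = a + (l.map (fun kv =>
          if ("abcdefghijklmnopqrstuvwxyz".toList).contains (PySem.Chars.lowerChar kv.1) then kv.2 else 0)).sum := by
  induction l generalizing a with
  | nil => simp
  | cons kv l ih =>
      simp only [List.foldl_cons, List.map_cons, List.sum_cons]
      by_cases h : ("abcdefghijklmnopqrstuvwxyz".toList).contains (PySem.Chars.lowerChar kv.1)
      · rw [if_pos h, if_pos h, ih]; ring
      · rw [if_neg h, if_neg h, ih]; ring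

-- ===== VERDICT (by name: the statement is the Claim_ definition above) =====
theorem digits_or_letters_spec : Claim_equal_digits_or_letters := by
  intro s _
  show _ = _
  simp only [digits_or_letters, digits_or_letters_alt]
  rw [PySem.Dict.foldl_insert_getD_add_one_eq_counter]
  rw [pv_A_fold, PySem.List.foldl_add, PySem.Dict.items_counter, pv_foldl_if_add,
    List.map_map]
  have hdig : (List.map (fun d => (PySem.Dict.counter s.toList).getD d 0) "0123456789".toList).sum
      = (s.toList.countP (fun c => ("0123456789".toList).contains c) : Int) := by
    rw [show (List.map (fun d => (PySem.Dict.counter s.toList).getD d 0) "0123456789".toList)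
        = List.map (fun d => (s.toList.count d : Int)) "0123456789".toList from
      List.map_congr_left fun d _ => PySem.Dict.getD_counter ..]
    exact pv_sum_count _ _ (by decide)
  have hlet : ((PySem.Set.ofList s.toList).map
        ((fun kv : Char × Int => if ("abcdefghijklmnopqrstuvwxyz".toList).contains (PySem.Chars.lowerChar kv.1) then kv.2 else 0)
          ∘ fun k => (k, (s.toList.count k : Int)))).sum
      = (s.toList.countP (fun c => ("abcdefghijklmnopqrstuvwxyz".toList).contains (PySem.Chars.lowerChar c)) : Int) :=
    pv_sum_count_filter (fun c => ("abcdefghijklmnopqrstuvwxyz".toList).contains (PySem.Chars.lowerChar c)) _ _ (PySem.Set.nodup_ofList _)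
      (fun x hx => (PySem.Set.mem_ofList _ _).mpr hx)
  rw [hdig, hlet]
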